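-- pv_equiv track=rewrite | github.com/jiang-yx6/openpose | pose/evalpose/pose_analyze/action_comparator.py | remove_tail_segments
-- ===== SOURCE A (Python) =====
-- def remove_tail_segments(segments, gap_thresh):
--     """
--     从尾部开始，检查连续尾部区间：
--     如果倒数第二段与最后一段之间的间隔 <= gap_thresh，则将这些连续尾部区间全部剔除。
--     返回剔除后的区间列表。
--     """
--     if len(segments) < 2:
--         return segments
--     # 从尾部开始，累计连续尾部区间的索引（例如：最后一段一定要剔除，如果前一段和当前段间隔满足条件，也一起剔除）
--     remove_indices = set()
--     remove_indices.add(len(segments) - 1)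
--     for i in range(len(segments) - 2, -1, -1):
--         # 比较当前区间的结束与下一区间的开始
--         gap = segments[i + 1][0] - segments[i][1]
--         if gap <= gap_thresh:
--             remove_indices.add(i)
--         else:
--             break
--     # 返回未被剔除的区间（保持原顺序）
--     new_segments = [seg for idx, seg in enumerate(segments) if idx not in remove_indices]
--     return new_segments
-- ===== SOURCE B (Python) =====
-- def remove_tail_segments(segments, gap_thresh):
--     """Forward single pass: the removed indices are exactly the suffix after the
--     LAST gap exceeding gap_thresh, so scan forward once recording that boundary
--     and slice there (no backward walk, no index set)."""
--     if len(segments) < 2: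
--         return segments
--     cut = 0
--     for i in range(len(segments) - 1):
--         if segments[i + 1][0] - segments[i][1] > gap_thresh:
--             cut = i + 1
--     return list(segments[:cut])
-- ===== Notes on version B (the rewrite author's own statement) =====
-- stated objective: alternative
-- what changed: Replaces A's backward walk with early break plus remove-index set and enumerate-filter rebuild by one forward pass that records the position after the last gap exceeding the threshold, then a single slice at that boundary.
import Mathlib
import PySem

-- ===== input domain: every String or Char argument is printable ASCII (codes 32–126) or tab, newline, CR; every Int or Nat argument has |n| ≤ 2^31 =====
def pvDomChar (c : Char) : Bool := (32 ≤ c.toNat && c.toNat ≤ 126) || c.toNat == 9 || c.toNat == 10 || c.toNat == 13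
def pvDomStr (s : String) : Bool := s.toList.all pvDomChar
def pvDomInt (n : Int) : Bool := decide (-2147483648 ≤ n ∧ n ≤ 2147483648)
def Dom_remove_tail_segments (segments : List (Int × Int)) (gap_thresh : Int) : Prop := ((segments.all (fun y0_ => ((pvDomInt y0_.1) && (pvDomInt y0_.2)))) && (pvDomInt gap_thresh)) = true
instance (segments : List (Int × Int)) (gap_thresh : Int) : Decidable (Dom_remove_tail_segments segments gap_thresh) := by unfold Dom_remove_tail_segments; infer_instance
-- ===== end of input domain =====

-- B replaces A's backward break-loop + remove-index set + enumerate/filter rebuild by one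
-- forward pass recording the position after the last over-threshold gap, then a single slice.

-- ===== PORT A =====
-- the 'for i in range(len(segments)-2, -1, -1)' loop with its break, building the remove_indices set
def pvLoopA (segments : List (Int × Int)) (gap_thresh : Int) : List Int → PySem.Set Int → PySem.Set Int
  | [], s => s
  | i :: rest, s =>
    let gap := (PySem.List.pyGetD segments (i + 1) (0, 0)).1 - (PySem.List.pyGetD segments i (0, 0)).2
    if gap ≤ gap_thresh then pvLoopA segments gap_thresh rest (PySem.Set.add s i) else s

def remove_tail_segments (segments : List (Int × Int)) (gap_thresh : Int) : List (Int × Int) :=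
  if segments.length < 2 then segments
  else
    let removeIndices : PySem.Set Int := PySem.Set.add PySem.Set.empty ((segments.length : Int) - 1)
    let removeIndices := pvLoopA segments gap_thresh
      (PySem.List.pyRange ((segments.length : Int) - 2) (-1) (-1)) removeIndices
    ((PySem.List.enumerate segments 0).filter (fun p => !(PySem.Set.contains removeIndices p.1))).map (·.2)

-- ===== PORT B =====
-- the 'for i in range(len(segments)-1): if …: cut = i + 1' forward loop, then segments[:cut]
def remove_tail_segments_alt (segments : List (Int × Int)) (gap_thresh : Int) : List (Int × Int) :=
  if segments.length < 2 then segments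
  else
    let cut : Int := (PySem.List.pyRange 0 ((segments.length : Int) - 1) 1).foldl
      (fun cut i =>
        if gap_thresh < (PySem.List.pyGetD segments (i + 1) (0, 0)).1 - (PySem.List.pyGetD segments i (0, 0)).2
        then i + 1 else cut) 0
    PySem.List.slice segments none (some cut)

-- ===== PRECONDITION & SPEC =====
def Spec_remove_tail_segments (segments : List (Int × Int)) (gap_thresh : Int) (out : List (Int × Int)) : Prop := out = remove_tail_segments_alt segments gap_thresh
instance (segments : List (Int × Int)) (gap_thresh : Int) (out : List (Int × Int)) : Decidable (Spec_remove_tail_segments segments gap_thresh out) := by unfold Spec_remove_tail_segments; infer_instance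

-- ===== CLAIM (what is proved, stated in full; the proofs are below) =====
def Claim_equal_remove_tail_segments : Prop := ∀ (segments : List (Int × Int)) (gap_thresh : Int), Dom_remove_tail_segments segments gap_thresh → Spec_remove_tail_segments segments gap_thresh (remove_tail_segments segments gap_thresh)

-- ===== LEMMAS AND PROOFS =====

-- proof-side reference cut: the common value both programs slice/filter at
def pvCut (segments : List (Int × Int)) (gap_thresh : Int) : Nat → Nat
  | 0 => 0
  | c + 1 =>
    if (segments.getD (c + 1) (0, 0)).1 - (segments.getD c (0, 0)).2 ≤ gap_thresh
    then pvCut segments gap_thresh c else c + 1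

theorem pvCut_le (s : List (Int × Int)) (g : Int) (m : Nat) : pvCut s g m ≤ m := by
  induction m with
  | zero => simp [pvCut]
  | succ c ih => unfold pvCut; split <;> omega

theorem pvCut_succ (s : List (Int × Int)) (g : Int) (c : Nat) :
    pvCut s g (c + 1) =
      if (s.getD (c + 1) (0, 0)).1 - (s.getD c (0, 0)).2 ≤ g then pvCut s g c else c + 1 := by
  conv_lhs => rw [pvCut]

-- membership in the set built by A's loop over [m, m-1, …, 0], in terms of pvCut
theorem pvLoopA_mem (s : List (Int × Int)) (g : Int) (m : Nat) :
    ∀ (S : PySem.Set Int) (j : Int),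
      j ∈ pvLoopA s g (PySem.List.pyRange (m : Int) (-1) (-1)) S ↔
        j ∈ S ∨ ((pvCut s g (m + 1) : Int) ≤ j ∧ j ≤ (m : Int)) := by
  induction m with
  | zero =>
    intro S j
    rw [PySem.List.pyRange_neg_one_cons (by norm_num : (-1 : Int) < ((0 : Nat) : Int))]
    rw [PySem.List.pyRange_neg_one_eq_nil (by norm_num : ((0 : Nat) : Int) - 1 ≤ -1)]
    have hg1 : PySem.List.pyGetD s (((0 : Nat) : Int) + 1) (0, 0) = s.getD (0 + 1) (0, 0) := by
      rw [show (((0 : Nat) : Int) + 1) = ((1 : Nat) : Int) by norm_num]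
      exact PySem.List.pyGetD_natCast ..
    have hg0 : PySem.List.pyGetD s ((0 : Nat) : Int) (0, 0) = s.getD 0 (0, 0) :=
      PySem.List.pyGetD_natCast ..
    simp only [pvLoopA, hg1, hg0, pvCut_succ]
    split
    · have h0 : pvCut s g 0 = 0 := rfl
      simp only [PySem.Set.mem_add, h0]
      constructor
      · rintro (h | h) <;> [exact Or.inl h; exact Or.inr (by push_cast; omega)]
      · rintro (h | h) <;> [exact Or.inl h; exact Or.inr (by push_cast at h; omega)]
    · constructor
      · exact Or.inl
      · rintro (h | h)
        · exact h
        · push_cast at h; omega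
  | succ c ih =>
    intro S j
    rw [PySem.List.pyRange_neg_one_cons (by push_cast; omega)]
    have hr : ((c : Int) + 1) - 1 = (c : Int) := by omega
    simp only [pvLoopA, Nat.cast_succ, hr]
    have hgA : PySem.List.pyGetD s (((c : Int) + 1) + 1) (0, 0) = s.getD (c + 1 + 1) (0, 0) := by
      rw [show (((c : Int) + 1) + 1) = ((c + 1 + 1 : Nat) : Int) by push_cast; ring]
      exact PySem.List.pyGetD_natCast ..
    have hgB : PySem.List.pyGetD s ((c : Int) + 1) (0, 0) = s.getD (c + 1) (0, 0) := by
      rw [show ((c : Int) + 1) = ((c + 1 : Nat) : Int) by push_cast; ring]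
      exact PySem.List.pyGetD_natCast ..
    rw [hgA, hgB, pvCut_succ s g (c + 1)]
    split
    · rw [ih]
      have := pvCut_le s g (c + 1)
      simp only [PySem.Set.mem_add]
      constructor
      · rintro ((h | h) | h) <;> [exact Or.inl h; omega; omega]
      · rintro (h | h)
        · exact Or.inl (Or.inl h)
        · by_cases hj : j = (c : Int) + 1
          · exact Or.inl (Or.inr hj)
          · exact Or.inr (by omega)
    · constructor
      · exact Or.inl
      · rintro (h | h)
        · exact h
        · omega

-- filtering an enumeration by an index predicate that is 'index < c' is take
theorem pvFilter_enumerate (c : Nat) (p : Int → Bool) :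
    ∀ (xs : List (Int × Int)) (s : Nat),
      (∀ k : Nat, s ≤ k → k < s + xs.length → p (k : Int) = decide (k < c)) →
      ((PySem.List.enumerate xs (s : Int)).filter (fun q => p q.1)).map (·.2) = xs.take (c - s) := by
  intro xs
  induction xs with
  | nil => intro s hp; simp [PySem.List.enumerate_nil]
  | cons x xs ih =>
    intro s hp
    rw [PySem.List.enumerate_cons]
    have hs : (s : Int) + 1 = ((s + 1 : Nat) : Int) := by push_cast; ring
    have htail := ih (s + 1) (fun k h1 h2 => hp k (by omega) (by simp at h2 ⊢; omega))
    have hhead : p (s : Int) = decide (s < c) := hp s le_rfl (by simp)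
    by_cases hc : s < c
    · have hp' : p (s : Int) = true := by rw [hhead]; simpa using hc
      have hcs : c - s = (c - (s + 1)) + 1 := by omega
      rw [List.filter_cons]
      simp only [hp', if_true]
      rw [List.map_cons, hs, htail, hcs, List.take_succ_cons]
    · have hp' : p (s : Int) = false := by rw [hhead]; simpa using hc
      have h1 : c - s = 0 := by omega
      have h2 : c - (s + 1) = 0 := by omega
      rw [List.filter_cons]
      simp only [hp', Bool.false_eq_true, if_false]
      rw [hs, htail, h1, h2, List.take_zero, List.take_zero]

-- B's forward fold over range(m) computes pvCut m
theorem pvFwd_eq_pvCut (s : List (Int × Int)) (g : Int) (m : Nat) :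
    (PySem.List.pyRange 0 (m : Int) 1).foldl
      (fun cut i =>
        if g < (PySem.List.pyGetD s (i + 1) (0, 0)).1 - (PySem.List.pyGetD s i (0, 0)).2
        then i + 1 else cut) 0 = (pvCut s g m : Int) := by
  induction m with
  | zero => simp [PySem.List.pyRange_one_eq_nil, pvCut]
  | succ c ih =>
    rw [show ((c + 1 : Nat) : Int) = (c : Int) + 1 by push_cast; ring]
    rw [PySem.List.pyRange_one_succ_right (by positivity)]
    rw [List.foldl_append, ih]
    simp only [List.foldl_cons, List.foldl_nil]
    have hg1 : PySem.List.pyGetD s ((c : Int) + 1) (0, 0) = s.getD (c + 1) (0, 0) := by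
      rw [show ((c : Int) + 1) = ((c + 1 : Nat) : Int) by push_cast; ring]
      exact PySem.List.pyGetD_natCast ..
    have hg0 : PySem.List.pyGetD s ((c : Int)) (0, 0) = s.getD c (0, 0) :=
      PySem.List.pyGetD_natCast ..
    rw [hg1, hg0, pvCut_succ]
    by_cases h : (s.getD (c + 1) (0, 0)).1 - (s.getD c (0, 0)).2 ≤ g
    · rw [if_neg (by omega), if_pos h]
    · rw [if_pos (by omega), if_neg h]
      push_cast
      ring

-- ===== VERDICT (by name: the statement is the Claim_ definition above) =====
theorem remove_tail_segments_spec : Claim_equal_remove_tail_segments := by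
  intro segs g _
  unfold Spec_remove_tail_segments remove_tail_segments remove_tail_segments_alt
  by_cases hlen : segs.length < 2
  · simp [hlen]
  · simp only [hlen, if_false]
    set n := segs.length with hn
    have hn2 : 2 ≤ n := by omega
    set c := pvCut segs g (n - 1) with hc
    have hcle : c ≤ n - 1 := pvCut_le segs g (n - 1)
    have hrange : ((n : Int) - 2) = ((n - 2 : Nat) : Int) := by omega
    -- B's side: the forward fold is pvCut, the slice is take
    have hB : ((n : Int) - 1) = ((n - 1 : Nat) : Int) := by omega
    have hfwd := pvFwd_eq_pvCut segs g (n - 1)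
    rw [← hB] at hfwd
    rw [hfwd, PySem.List.slice_to_natCast]
    -- A's side: membership in the final remove set
    have hmem : ∀ j : Int,
        (j ∈ pvLoopA segs g (PySem.List.pyRange ((n : Int) - 2) (-1) (-1))
          (PySem.Set.add PySem.Set.empty ((n : Int) - 1))) ↔
        (j = (n : Int) - 1 ∨ ((c : Int) ≤ j ∧ j ≤ (n : Int) - 2)) := by
      intro j
      rw [hrange, pvLoopA_mem]
      have : n - 2 + 1 = n - 1 := by omega
      rw [this]
      simp only [PySem.Set.mem_add, PySem.Set.empty]
      constructor
      · rintro ((h | h) | h)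
        · simp at h
        · exact Or.inl (by omega)
        · exact Or.inr (by omega)
      · rintro (h | h)
        · exact Or.inl (Or.inr (by omega))
        · exact Or.inr (by omega)
    have := pvFilter_enumerate c
      (fun i => !(PySem.Set.contains
        (pvLoopA segs g (PySem.List.pyRange ((n : Int) - 2) (-1) (-1))
          (PySem.Set.add PySem.Set.empty ((n : Int) - 1))) i)) segs 0 ?_
    · rw [show ((0 : Nat) : Int) = (0 : Int) by norm_num] at this
      rw [this]
      simp
      omega
    · intro k _ hk2
      simp only [Nat.zero_add] at hk2
      by_cases hkc : k < c
      · simp only [hkc, decide_true, Bool.not_eq_true', ← Bool.not_eq_true,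
          PySem.Set.contains_iff]
        intro hmem'
        rw [hmem] at hmem'
        rcases hmem' with h | h <;> omega
      · have hin : (k : Int) ∈ pvLoopA segs g (PySem.List.pyRange ((n : Int) - 2) (-1) (-1))
            (PySem.Set.add PySem.Set.empty ((n : Int) - 1)) := by
          rw [hmem]
          by_cases hk1 : k = n - 1
          · exact Or.inl (by omega)
          · exact Or.inr (by constructor <;> omega)
        simp only [hkc, decide_false]
        rw [Bool.not_eq_false', PySem.Set.contains_iff]
        exact hin
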